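-- pv_equiv track=rewrite | github.com/ega22a/PythonInstitute | 4_5_3Python.py | sumUntilNotLastPositive
-- ===== SOURCE A (Python) =====
-- def sumUntilNotLastPositive(_list):
--     trigger = False
--     answer = 0
--     for value in _list[::-1]:
--         if (value > 0):
--             trigger = True
--         if (trigger):
--             answer += value
--     return answer
-- ===== SOURCE B (Python) =====
-- def sumUntilNotLastPositive(_list):
--     last = -1
--     for i, v in enumerate(_list):
--         if v > 0:
--             last = i
--     return sum(_list[:last + 1]) if last >= 0 else 0
-- ===== Notes on version B (the rewrite author's own statement) =====
-- stated objective: alternative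
-- what changed: Replaces A's latched reverse sweep (trigger flag over _list[::-1]) with a forward enumerate pass that records the index of the last positive element, then one prefix sum up to that index.
import Mathlib
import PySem

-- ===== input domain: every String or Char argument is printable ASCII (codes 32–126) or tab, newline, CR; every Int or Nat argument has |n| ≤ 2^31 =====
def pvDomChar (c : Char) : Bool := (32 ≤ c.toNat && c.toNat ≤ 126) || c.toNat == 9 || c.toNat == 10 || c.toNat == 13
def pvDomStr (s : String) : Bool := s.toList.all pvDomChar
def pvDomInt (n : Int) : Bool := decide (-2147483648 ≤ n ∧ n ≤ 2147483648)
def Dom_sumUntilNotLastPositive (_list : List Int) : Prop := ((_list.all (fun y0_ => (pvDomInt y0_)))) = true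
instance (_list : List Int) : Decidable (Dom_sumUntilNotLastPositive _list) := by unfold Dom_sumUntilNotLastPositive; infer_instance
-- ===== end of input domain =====

-- B replaces A's latched reverse sweep with a forward last-positive-index pass plus one prefix sum; return value equivalence proved on all inputs.

-- ===== PORT A =====
-- the for-loop over _list[::-1] with state (trigger, answer)
def pvALoop : List Int → Bool → Int → Int
  | [], _, answer => answer
  | value :: rest, trigger, answer =>
    let trigger' := if value > 0 then true else trigger
    let answer' := if trigger' then answer + value else answer
    pvALoop rest trigger' answer'

def sumUntilNotLastPositive (_list : List Int) : Int :=
  pvALoop ((PySem.List.slice? _list none none (-1)).getD []) false 0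

-- ===== PORT B =====
-- the enumerate loop recording the index of the last positive element
def pvLastPos : List Int → Int → Int → Int
  | [], _, last => last
  | v :: rest, i, last => pvLastPos rest (i + 1) (if v > 0 then i else last)

def sumUntilNotLastPositive_alt (_list : List Int) : Int :=
  let last := pvLastPos _list 0 (-1)
  if last ≥ 0 then (_list.take (last + 1).toNat).foldl (· + ·) 0 else 0

-- ===== PRECONDITION & SPEC =====
def Spec_sumUntilNotLastPositive (_list : List Int) (out : Int) : Prop := out = sumUntilNotLastPositive_alt _list
instance (_list : List Int) (out : Int) : Decidable (Spec_sumUntilNotLastPositive _list out) := by unfold Spec_sumUntilNotLastPositive; infer_instance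

-- ===== CLAIM (what is proved, stated in full; the proofs are below) =====
def Claim_equal_sumUntilNotLastPositive : Prop := ∀ (_list : List Int), Dom_sumUntilNotLastPositive _list → Spec_sumUntilNotLastPositive _list (sumUntilNotLastPositive _list)

-- ===== LEMMAS AND PROOFS =====

theorem pvALoop_true (xs : List Int) (a : Int) : pvALoop xs true a = a + xs.sum := by
  induction xs generalizing a with
  | nil => simp [pvALoop]
  | cons x xs ih => simp [pvALoop, ih, List.sum_cons]; ring

-- pvLastPos stays below i + length (plus keeps the seed as the other option)
theorem pvLastPos_lt (xs : List Int) (i last : Int) :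
    pvLastPos xs i last < max (last + 1) (i + xs.length) := by
  induction xs generalizing i last with
  | nil => simp only [pvLastPos, List.length_nil]; omega
  | cons x xs ih =>
    simp only [pvLastPos, List.length_cons]
    by_cases h : x > 0
    · have := ih (i + 1) i
      simp only [h, if_pos]
      push_cast at *; omega
    · have := ih (i + 1) last
      simp only [h, if_neg, if_false]
      push_cast at *; omega

theorem pvLastPos_append_pos (ys : List Int) (x i last : Int) (hx : x > 0) :
    pvLastPos (ys ++ [x]) i last = i + ys.length := by
  induction ys generalizing i last with
  | nil => simp [pvLastPos, hx]
  | cons y ys ih => simp [pvLastPos, ih]; push_cast; ring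

theorem pvLastPos_append_nonpos (ys : List Int) (x i last : Int) (hx : ¬ x > 0) :
    pvLastPos (ys ++ [x]) i last = pvLastPos ys i last := by
  induction ys generalizing i last with
  | nil => simp [pvLastPos, hx]
  | cons y ys ih => simp [pvLastPos, ih]

theorem foldl_add_sum (xs : List Int) : xs.foldl (· + ·) 0 = xs.sum := by
  rw [List.sum_eq_foldl]

theorem alt_snoc_nonpos (ys : List Int) (x : Int) (hx : ¬ x > 0) :
    sumUntilNotLastPositive_alt (ys ++ [x]) = sumUntilNotLastPositive_alt ys := by
  unfold sumUntilNotLastPositive_alt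
  rw [pvLastPos_append_nonpos ys x 0 (-1) hx]
  dsimp only
  by_cases h : pvLastPos ys 0 (-1) ≥ 0
  · have hlt : pvLastPos ys 0 (-1) < (0 : Int) + ys.length := by
      have := pvLastPos_lt ys 0 (-1); omega
    rw [if_pos h, if_pos h, List.take_append_of_le_length (by omega)]
  · rw [if_neg h, if_neg h]

theorem a_eq_loop (l : List Int) : sumUntilNotLastPositive l = pvALoop l.reverse false 0 := by
  unfold sumUntilNotLastPositive
  rw [PySem.List.slice?_none_none_neg_one]
  rfl

-- ===== VERDICT (by name: the statement is the Claim_ definition above) =====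
theorem main_eq (l : List Int) : pvALoop l.reverse false 0 = sumUntilNotLastPositive_alt l := by
  induction l using List.reverseRecOn with
  | nil => simp [pvALoop, sumUntilNotLastPositive_alt, pvLastPos]
  | append_singleton ys x ih =>
    rw [List.reverse_append]
    simp only [List.reverse_cons, List.reverse_nil, List.nil_append, List.singleton_append]
    by_cases hx : x > 0
    · simp only [pvALoop, hx, if_pos, if_true]
      rw [pvALoop_true]
      unfold sumUntilNotLastPositive_alt
      rw [pvLastPos_append_pos ys x 0 (-1) hx]
      have : ((0 : Int) + ys.length + 1).toNat = ys.length + 1 := by omega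
      rw [if_pos (by positivity), this, List.take_of_length_le (by simp), foldl_add_sum]
      simp [List.sum_append, List.sum_reverse]
      ring
    · simp only [pvALoop, hx, if_neg, if_false, Bool.false_eq_true]
      rw [alt_snoc_nonpos ys x hx]
      exact ih

theorem sumUntilNotLastPositive_spec : Claim_equal_sumUntilNotLastPositive := by
  intro l _
  show sumUntilNotLastPositive l = sumUntilNotLastPositive_alt l
  rw [a_eq_loop, main_eq]
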